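-- pv_equiv track=rewrite | github.com/KrolMateusz/Crypto | Alghoritms/frequency_analysis.py | get_frequency_order
-- ===== SOURCE A (Python) =====
-- import string
--
-- ETAOIN = 'ETAOINSHRDLCUMWFGYPBVKJXQZ'
--
-- LETTERS = string.ascii_uppercase
--
-- def get_letter_count(message):
--     letter_count = {'A': 0, 'B': 0, 'C': 0, 'D': 0, 'E': 0, 'F': 0, 'G': 0,
--                     'H': 0, 'I': 0, 'J': 0, 'K': 0, 'L': 0, 'M': 0, 'N': 0,
--                     'O': 0, 'P': 0, 'Q': 0, 'R': 0, 'S': 0, 'T': 0, 'U': 0,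
--                     'V': 0, 'W': 0, 'X': 0, 'Y': 0, 'Z': 0}
--     for letter in message.upper():
--         if letter in LETTERS:
--             letter_count[letter] += 1
--     return letter_count
--
-- def get_item_at_index_zero(item):
--     return item[0]
--
-- def get_frequency_order(message):
--     letter_to_frequency = get_letter_count(message)
--     frequency_to_letter = {}
--     for letter in LETTERS:
--         if letter_to_frequency[letter] not in frequency_to_letter:
--             frequency_to_letter[letter_to_frequency[letter]] = [letter]
--         else:
--             frequency_to_letter[letter_to_frequency[letter]].append(letter)
--     for frequency in frequency_to_letter:
--         frequency_to_letter[frequency].sort(key=ETAOIN.find, reverse=True)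
--         frequency_to_letter[frequency] = ''.join(frequency_to_letter
--                                                  [frequency])
--     frequency_pairs = list(frequency_to_letter.items())
--     frequency_pairs.sort(key=get_item_at_index_zero, reverse=True)
--     frequency_order = []
--     for frequency_pair in frequency_pairs:
--         frequency_order.append(frequency_pair[1])
--     return ''.join(frequency_order)
-- ===== SOURCE B (Python) =====
-- ETAOIN = 'ETAOINSHRDLCUMWFGYPBVKJXQZ'
--
-- def get_frequency_order(message):
--     counts = {letter: 0 for letter in ETAOIN}
--     for ch in message.upper():
--         if ch in counts:
--             counts[ch] += 1
--     return ''.join(sorted(ETAOIN, key=lambda c: (counts[c], ETAOIN.find(c)), reverse=True))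
-- ===== Notes on version B (the rewrite author's own statement) =====
-- stated objective: simpler
-- what changed: Replaces the frequency-bucket grouping dict and its two separate sorts by one direct sort of the 26 letters under the composite key (count, ETAOIN position) with reverse=True.
import Mathlib
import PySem

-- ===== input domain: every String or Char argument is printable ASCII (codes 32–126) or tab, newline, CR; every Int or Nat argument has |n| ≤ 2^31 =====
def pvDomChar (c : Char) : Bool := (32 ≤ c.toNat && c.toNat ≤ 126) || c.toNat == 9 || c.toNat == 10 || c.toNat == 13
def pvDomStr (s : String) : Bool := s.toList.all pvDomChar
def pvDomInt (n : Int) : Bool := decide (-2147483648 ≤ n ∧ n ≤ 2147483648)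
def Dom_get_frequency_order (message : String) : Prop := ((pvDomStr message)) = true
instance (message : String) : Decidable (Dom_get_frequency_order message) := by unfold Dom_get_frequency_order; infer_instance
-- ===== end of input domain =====

set_option maxRecDepth 8000

-- B replaces A's frequency-bucket dict and its two separate sorts by one sort of the
-- 26 letters under the composite key (count, ETAOIN position) with reverse=True (objective: simpler).

-- ===== PORT A =====
-- the module constants ETAOIN and LETTERS, as their character lists
def pvETAOINL : List Char := ['E','T','A','O','I','N','S','H','R','D','L','C','U','M','W','F','G','Y','P','B','V','K','J','X','Q','Z']
def pvLETTERSL : List Char := ['A','B','C','D','E','F','G','H','I','J','K','L','M','N','O','P','Q','R','S','T','U','V','W','X','Y','Z']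

-- ETAOIN.find(c) for a single character c (PySem.Str.find is the same PySem.Chars.find on the toList's)
def pvIdx (c : Char) : Int := PySem.Chars.find pvETAOINL [c]

-- the literal 26-entry dict of get_letter_count
def pvInitCount : PySem.Dict Char Int := PySem.Dict.ofList
  [('A', 0), ('B', 0), ('C', 0), ('D', 0), ('E', 0), ('F', 0), ('G', 0),
   ('H', 0), ('I', 0), ('J', 0), ('K', 0), ('L', 0), ('M', 0), ('N', 0),
   ('O', 0), ('P', 0), ('Q', 0), ('R', 0), ('S', 0), ('T', 0), ('U', 0),
   ('V', 0), ('W', 0), ('X', 0), ('Y', 0), ('Z', 0)]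

-- get_letter_count: 'letter in LETTERS' on the 1-char letter = membership of the char;
-- 'letter_count[letter] += 1' = Dict.modify (KeyError impossible: the guard admits only pre-inserted keys)
def pvGetLetterCount (message : String) : PySem.Dict Char Int :=
  (PySem.Str.upper message).toList.foldl
    (fun d ch => if pvLETTERSL.contains ch then d.modify ch 0 (· + 1) else d)
    pvInitCount

def get_frequency_order (message : String) : String :=
  let letter_to_frequency := pvGetLetterCount message
  -- first loop: group the letters into buckets by frequency ('letter_to_frequency[letter]' never raises: every letter is a key)
  let frequency_to_letter : PySem.Dict Int (List Char) :=
    pvLETTERSL.foldl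
      (fun d c =>
        if d.contains (letter_to_frequency.getD c 0) = false then
          d.insert (letter_to_frequency.getD c 0) [c]
        else
          d.modify (letter_to_frequency.getD c 0) [] (· ++ [c]))
      PySem.Dict.empty
  -- second loop: per bucket sort by ETAOIN.find reverse=True and ''.join (values replaced in place, keys untouched)
  let frequency_to_letter2 : PySem.Dict Int String :=
    PySem.Dict.mk (frequency_to_letter.items.map (fun p =>
      (p.1, PySem.Str.join "" ((PySem.List.sorted p.2 pvIdx true).map
              (fun c => String.ofList [c])))))
  let frequency_pairs := frequency_to_letter2.items
  let frequency_pairs := PySem.List.sorted frequency_pairs (fun p => p.1) true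
  let frequency_order := frequency_pairs.foldl (fun acc p => acc ++ [p.2]) ([] : List String)
  PySem.Str.join "" frequency_order

-- ===== PORT B =====
-- the dict comprehension {letter: 0 for letter in ETAOIN}
def pvInitB : PySem.Dict Char Int := PySem.Dict.ofList (pvETAOINL.map (fun c => (c, (0 : Int))))

-- B's counting loop: 'if ch in counts: counts[ch] += 1'
def pvCountsB (message : String) : PySem.Dict Char Int :=
  (PySem.Str.upper message).toList.foldl
    (fun d ch => if d.contains ch then d.modify ch 0 (· + 1) else d)
    pvInitB

def get_frequency_order_alt (message : String) : String :=
  let counts := pvCountsB message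
  PySem.Str.join "" ((PySem.List.sorted2 pvETAOINL
      (fun c => counts.getD c 0) pvIdx true).map
      (fun c => String.ofList [c]))

-- ===== PRECONDITION & SPEC =====
def Spec_get_frequency_order (message : String) (out : String) : Prop := out = get_frequency_order_alt message
instance (message : String) (out : String) : Decidable (Spec_get_frequency_order message out) := by unfold Spec_get_frequency_order; infer_instance

-- ===== CLAIM (what is proved, stated in full; the proofs are below) =====
def Claim_equal_get_frequency_order : Prop := ∀ (message : String), Dom_get_frequency_order message → Spec_get_frequency_order message (get_frequency_order message)

-- ===== LEMMAS AND PROOFS =====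

-- the count of an (upper-cased) letter in the message, as both ports compute it
def cntMsg (m : String) (c : Char) : Int := ((PySem.Str.upper m).toList.count c : Int)
-- the composite comparison key: primary the count, secondary the ETAOIN position
def pvKey (m : String) (c : Char) : Int := 26 * cntMsg m c + pvIdx c

theorem idxvals : pvLETTERSL.map pvIdx = [2, 19, 11, 9, 0, 15, 16, 7, 4, 22, 21, 10, 13, 5, 3, 18, 24, 8, 6, 1, 12, 20, 14, 23, 17, 25] := by rfl

theorem idx_bounds : ∀ c ∈ pvLETTERSL, 0 ≤ pvIdx c ∧ pvIdx c < 26 := by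
  intro c hc; fin_cases hc <;> decide

theorem idx_nodup : (pvLETTERSL.map pvIdx).Nodup := by rw [idxvals]; decide

theorem etaoin_perm_letters : pvETAOINL.Perm pvLETTERSL := by
  rw [← List.isPerm_iff]; decide

theorem charsJoin_nil_eq_flatten : ∀ (L : List (List Char)), PySem.Chars.join [] L = L.flatten := by
  intro L
  induction L with
  | nil => simp [PySem.Chars.join_nil]
  | cons p rest ih =>
    cases rest with
    | nil => simp [PySem.Chars.join_singleton]
    | cons q t =>
      rw [PySem.Chars.join_cons_cons]
      simp only [List.flatten_cons] at ih ⊢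
      rw [ih]; simp

theorem toList_join_singletons (cs : List Char) :
    (PySem.Str.join "" (cs.map (fun c => String.ofList [c]))).toList = cs := by
  have h : (List.map String.toList (cs.map (fun c => String.ofList [c]))) = cs.map (fun c => [c]) := by
    simp [List.map_map, Function.comp_def]
  simp only [PySem.Str.join, String.toList_ofList, h]
  have : ("" : String).toList = [] := rfl
  rw [this, PySem.Chars.join_nil_singletons]

theorem foldl_if_filter {α β : Type} (P : α → Bool) (g : β → α → β) :
    ∀ (l : List α) (acc : β),
      l.foldl (fun d x => if P x then g d x else d) acc = (l.filter P).foldl g acc := by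
  intro l
  induction l with
  | nil => intro acc; rfl
  | cons x t ih =>
    intro acc
    by_cases h : P x = true
    · simp [List.foldl_cons, h, ih]
    · simp at h
      simp [List.foldl_cons, h, ih]

theorem initCount_getD : ∀ c ∈ pvLETTERSL, pvInitCount.getD c 0 = 0 := by
  intro c hc; fin_cases hc <;> rfl

theorem cntA (m : String) : ∀ c ∈ pvLETTERSL, (pvGetLetterCount m).getD c 0 = cntMsg m c := by
  intro c hc
  unfold pvGetLetterCount cntMsg
  rw [foldl_if_filter, PySem.Dict.getD_foldl_modify_add_one, initCount_getD c hc,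
      List.count_filter (by simpa using hc)]
  simp

-- B's counting loop: the keys never change, so the 'ch in counts' test is the static membership test
theorem foldB_getD (c : Char) :
    ∀ (l : List Char) (d : PySem.Dict Char Int), d.contains c = true →
      (l.foldl (fun d ch => if d.contains ch then d.modify ch 0 (· + 1) else d) d).getD c 0
        = d.getD c 0 + l.count c := by
  intro l
  induction l with
  | nil => intro d _; simp
  | cons ch t ih =>
    intro d hc
    by_cases h : d.contains ch = true
    · have hk : (d.modify ch 0 (· + 1)).contains c = true := by
        rw [PySem.Dict.contains_modify]
        rcases Bool.or_eq_true _ _ |>.mpr (Or.inr hc) with _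
        simp [hc]
      rw [List.foldl_cons, if_pos h, ih _ hk, PySem.Dict.getD_modify]
      by_cases hcc : c = ch
      · subst hcc; simp; omega
      · simp [hcc, Ne.symm hcc]
    · have hne : ch ≠ c := by
        intro e; subst e; simp [h] at hc
      simp only [List.foldl_cons, if_neg h]
      rw [ih _ hc]
      simp [hne]

theorem initB_getD : ∀ c ∈ pvETAOINL, pvInitB.getD c 0 = 0 := by
  intro c hc; fin_cases hc <;> rfl

theorem initB_contains : ∀ c ∈ pvETAOINL, pvInitB.contains c = true := by
  intro c hc; fin_cases hc <;> rfl

theorem cntB (m : String) : ∀ c ∈ pvETAOINL, (pvCountsB m).getD c 0 = cntMsg m c := by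
  intro c hc
  rw [pvCountsB, foldB_getD c _ _ (initB_contains c hc), initB_getD c hc]
  simp [cntMsg]

theorem insertBy_congr {α : Type} (f g : α → α → Bool) (x : α) :
    ∀ (ys : List α), (∀ y ∈ ys, f x y = g x y) →
      PySem.List.insertBy f x ys = PySem.List.insertBy g x ys := by
  intro ys
  induction ys with
  | nil => intro _; rfl
  | cons y t ih =>
    intro h
    have hy := h y (by simp)
    simp only [PySem.List.insertBy, hy]
    by_cases hg : g x y = true
    · simp [hg]
    · simp only [Bool.not_eq_true] at hg
      simp only [hg]
      rw [ih (fun z hz => h z (by simp [hz]))]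

theorem foldl_insertBy_congr {α : Type} (P : α → Prop) (f g : α → α → Bool)
    (hfg : ∀ a b, P a → P b → f a b = g a b) :
    ∀ (l : List α) (acc : List α), (∀ x ∈ l, P x) → (∀ x ∈ acc, P x) →
      l.foldl (fun acc x => PySem.List.insertBy f x acc) acc
        = l.foldl (fun acc x => PySem.List.insertBy g x acc) acc := by
  intro l
  induction l with
  | nil => intro acc _ _; rfl
  | cons x t ih =>
    intro acc hl hacc
    have hx : P x := hl x (by simp)
    have h1 : PySem.List.insertBy f x acc = PySem.List.insertBy g x acc :=
      insertBy_congr f g x acc (fun y hy => hfg x y hx (hacc y hy))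
    simp only [List.foldl_cons, h1]
    exact ih _ (fun z hz => hl z (by simp [hz]))
      (fun z hz => by
        rw [PySem.List.mem_insertBy] at hz
        rcases hz with h | h
        · exact h ▸ hx
        · exact hacc z h)

-- the grouping loop of A: items = first-occurrence-ordered frequencies, each with its letters in list order
theorem groupItems (f : Char → Int) (l : List Char) :
    (l.foldl (fun d c => d.modify (f c) [] (· ++ [c])) PySem.Dict.empty).items
      = (PySem.Set.ofList (l.map f)).map (fun v => (v, l.filter (fun c => f c == v))) := by
  have hmap : (l.foldl (fun d c => d.modify (f c) [] (· ++ [c])) PySem.Dict.empty)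
      = ((l.map (fun c => (f c, c))).foldl (fun d p => d.modify p.1 [] (· ++ [p.2])) PySem.Dict.empty) := by
    rw [List.foldl_map]
  have hkeys : (l.foldl (fun d c => d.modify (f c) [] (· ++ [c])) PySem.Dict.empty).keys
      = PySem.Set.ofList (l.map f) := by
    rw [hmap]
    rw [PySem.Dict.keys_foldl_modify_key (l.map (fun c => (f c, c))) Prod.fst []
        (fun _ p => (· ++ [p.2])) PySem.Dict.empty]
    simp [List.map_map, Function.comp_def, PySem.Set.ofList_eq_foldl, PySem.Set.update]
  have hnodup : (l.foldl (fun d c => d.modify (f c) [] (· ++ [c])) PySem.Dict.empty).keys.Nodup := by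
    rw [hmap]
    exact PySem.Dict.nodup_keys_foldl_modify_key _ Prod.fst [] _ _ (by simp)
  rw [PySem.Dict.items_eq_map_keys _ hnodup [], hkeys]
  apply List.map_congr_left
  intro v _
  congr 1
  rw [hmap, PySem.Dict.getD_foldl_modify_append]
  simp [List.filter_map, List.map_map, Function.comp_def]

theorem sumIf (v : Int) (n : Nat) :
    ∀ (F : List Int), F.Nodup → ((F.map (fun f => if v = f then n else 0)).sum = if v ∈ F then n else 0) := by
  intro F
  induction F with
  | nil => simp
  | cons f t ih =>
    intro hnd
    rcases List.nodup_cons.mp hnd with ⟨hf, ht⟩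
    by_cases h : v = f
    · subst h
      have : v ∉ t := hf
      simp [ih ht, this]
    · simp [List.sum_cons, h, ih ht]

theorem countBucket (f : Char → Int) (l : List Char) (v : Int) (x : Char) :
    (l.filter (fun c => f c == v)).count x = if f x = v then l.count x else 0 := by
  by_cases h : f x = v
  · rw [List.count_filter (by simp [h]), if_pos h]
  · rw [if_neg h]
    apply List.count_eq_zero.mpr
    intro hx
    rcases List.mem_filter.mp hx with ⟨_, hp⟩
    simp at hp
    exact h hp

theorem bucketsPerm (f : Char → Int) (l : List Char) :
    ((PySem.Set.ofList (l.map f)).map (fun v => l.filter (fun c => f c == v))).flatten.Perm l := by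
  rw [List.perm_iff_count]
  intro x
  rw [List.count_flatten, List.map_map]
  have h1 : (List.map (List.count x ∘ fun v => l.filter (fun c => f c == v)) (PySem.Set.ofList (l.map f)))
      = (PySem.Set.ofList (l.map f)).map (fun v => if f x = v then l.count x else 0) := by
    apply List.map_congr_left
    intro v _
    simp [countBucket]
  rw [h1, sumIf (f x) (l.count x) _ (PySem.Set.nodup_ofList _)]
  by_cases hx : x ∈ l
  · rw [if_pos ((PySem.Set.mem_ofList _ _).mpr (List.mem_map_of_mem hx))]
  · have hc : l.count x = 0 := List.count_eq_zero.mpr hx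
    simp [hc]

theorem flatten_perm_congr {α β : Type} (g h : β → List α) :
    ∀ (F : List β), (∀ x ∈ F, (g x).Perm (h x)) → ((F.map g).flatten).Perm ((F.map h).flatten) := by
  intro F
  induction F with
  | nil => intro _; simp
  | cons x t ih =>
    intro hx
    simp only [List.map_cons, List.flatten_cons]
    exact (hx x (by simp)).append (ih (fun z hz => hx z (by simp [hz])))

theorem insertBy_cons {α : Type} (f : α → α → Bool) (x y : α) (ys : List α) :
    PySem.List.insertBy f x (y :: ys) = if f x y then x :: y :: ys else y :: PySem.List.insertBy f x ys := rfl

-- sorting pairs by fst commutes with a fst-preserving map of the values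
theorem insertBy_fst_map {β γ : Type} (g : Int × β → Int × γ) (hg : ∀ p, (g p).1 = p.1) (x : Int × β) :
    ∀ (ys : List (Int × β)),
      PySem.List.insertBy (fun a b => decide (b.1 < a.1)) (g x) (ys.map g)
        = (PySem.List.insertBy (fun a b => decide (b.1 < a.1)) x ys).map g := by
  intro ys
  induction ys with
  | nil => rfl
  | cons y t ih =>
    simp only [List.map_cons, insertBy_cons, hg]
    by_cases h : y.1 < x.1
    · simp [h]
    · simp [h, ih]

theorem sorted_fst_map_comm {β γ : Type} (g : Int × β → Int × γ) (hg : ∀ p, (g p).1 = p.1)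
    (G : List (Int × β)) :
    PySem.List.sorted (G.map g) (fun p => p.1) true
      = (PySem.List.sorted G (fun p => p.1) true).map g := by
  have key : ∀ (G : List (Int × β)) (acc : List (Int × β)),
      (G.map g).foldl (fun acc x => PySem.List.insertBy (fun a b => decide (b.1 < a.1)) x acc) (acc.map g)
        = (G.foldl (fun acc x => PySem.List.insertBy (fun a b => decide (b.1 < a.1)) x acc) acc).map g := by
    intro G
    induction G with
    | nil => intro acc; rfl
    | cons x t ih =>
      intro acc
      simp only [List.map_cons, List.foldl_cons]
      rw [insertBy_fst_map g hg x acc, ih]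
  have h0 := key G []
  simpa [PySem.List.sorted] using h0

-- the per-frequency buckets of A, each already sorted by ETAOIN position descending
def pvBuckets (f : Char → Int) : List (Int × List Char) :=
  (PySem.Set.ofList (pvLETTERSL.map f)).map
    (fun v => (v, PySem.List.sorted (pvLETTERSL.filter (fun c => f c == v)) pvIdx true))

theorem letters_pairwise_idx_ne : pvLETTERSL.Pairwise (fun a b => pvIdx a ≠ pvIdx b) :=
  (List.pairwise_map).mp idx_nodup

-- the flattened sorted buckets are exactly the 26 letters sorted by the composite key, descending
theorem buckets_eq_sorted_key (f : Char → Int) :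
    PySem.List.sorted pvETAOINL (fun c => 26 * f c + pvIdx c) true
      = ((PySem.List.sorted (pvBuckets f) (fun p => p.1) true).map (fun p => p.2)).flatten := by
  have hmemSP : ∀ p ∈ PySem.List.sorted (pvBuckets f) (fun p => p.1) true,
      p.1 ∈ PySem.Set.ofList (pvLETTERSL.map f) ∧
      p.2 = PySem.List.sorted (pvLETTERSL.filter (fun c => f c == p.1)) pvIdx true := by
    intro p hp
    have hp2 : p ∈ pvBuckets f := (PySem.List.mem_sorted _ _ _ _).mp hp
    rcases List.mem_map.mp hp2 with ⟨v, hv, he⟩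
    rw [← he]
    exact ⟨hv, rfl⟩
  have hbmem : ∀ v : Int, ∀ a ∈ PySem.List.sorted (pvLETTERSL.filter (fun c => f c == v)) pvIdx true,
      f a = v ∧ a ∈ pvLETTERSL := by
    intro v a ha
    have : a ∈ pvLETTERSL.filter (fun c => f c == v) := (PySem.List.mem_sorted _ _ _ _).mp ha
    rcases List.mem_filter.mp this with ⟨hmem, hfa⟩
    simp at hfa
    exact ⟨hfa, hmem⟩
  apply PySem.List.sorted_rev_eq_of_perm_of_pairwise_gt
  · -- the flattened buckets are a permutation of the 26 letters
    have p1 : ((PySem.List.sorted (pvBuckets f) (fun p => p.1) true).map (fun p => p.2)).Perm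
        ((pvBuckets f).map (fun p => p.2)) :=
      (PySem.List.sorted_perm _ _ _).map _
    have q := p1.flatten
    have p2 : ((pvBuckets f).map (fun p => p.2))
        = (PySem.Set.ofList (pvLETTERSL.map f)).map
            (fun v => PySem.List.sorted (pvLETTERSL.filter (fun c => f c == v)) pvIdx true) := by
      simp [pvBuckets, List.map_map, Function.comp_def]
    rw [p2] at q
    have p3 : (((PySem.Set.ofList (pvLETTERSL.map f)).map
          (fun v => PySem.List.sorted (pvLETTERSL.filter (fun c => f c == v)) pvIdx true)).flatten).Perm
        (((PySem.Set.ofList (pvLETTERSL.map f)).map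
          (fun v => pvLETTERSL.filter (fun c => f c == v))).flatten) :=
      flatten_perm_congr _ _ _ (fun v _ => PySem.List.sorted_perm _ _ _)
    exact (q.trans (p3.trans (bucketsPerm f pvLETTERSL))).trans etaoin_perm_letters.symm
  · -- strictly descending composite key across the flattened buckets
    rw [List.pairwise_flatten]
    constructor
    · intro lst hlst
      rcases List.mem_map.mp hlst with ⟨p, hp, he⟩
      rcases hmemSP p hp with ⟨_, hps⟩
      subst he
      rw [hps]
      have hle : (PySem.List.sorted (pvLETTERSL.filter (fun c => f c == p.1)) pvIdx true).Pairwise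
          (fun a b => pvIdx b ≤ pvIdx a) :=
        PySem.List.sorted_pairwise_rev _ _
      have hne : (PySem.List.sorted (pvLETTERSL.filter (fun c => f c == p.1)) pvIdx true).Pairwise
          (fun a b => pvIdx a ≠ pvIdx b) := by
        have hb : (pvLETTERSL.filter (fun c => f c == p.1)).Pairwise (fun a b => pvIdx a ≠ pvIdx b) :=
          letters_pairwise_idx_ne.sublist List.filter_sublist
        have hsym : Symmetric (fun a b : Char => pvIdx a ≠ pvIdx b) :=
          fun a b hab => fun e => hab e.symm
        exact ((PySem.List.sorted_perm _ pvIdx true).pairwise_iff (fun {a b} h e => h e.symm)).mpr hb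
      refine ((hle.and hne).imp_of_mem ?_)
      intro a b ha hb h
      have hfa := hbmem p.1 a ha
      have hfb := hbmem p.1 b hb
      have hlt : pvIdx b < pvIdx a := lt_of_le_of_ne h.1 (Ne.symm h.2)
      rw [hfa.1, hfb.1]
      omega
    · rw [List.pairwise_map]
      have h1 : (PySem.List.sorted (pvBuckets f) (fun p => p.1) true).Pairwise
          (fun p q => q.1 ≤ p.1) := PySem.List.sorted_pairwise_rev _ _
      have h2 : (PySem.List.sorted (pvBuckets f) (fun p => p.1) true).Pairwise
          (fun p q => p.1 ≠ q.1) := by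
        have hnodupF : (((pvBuckets f).map (fun p => p.1))).Nodup := by
          have he : ((pvBuckets f).map (fun p => p.1)) = PySem.Set.ofList (pvLETTERSL.map f) := by
            simp [pvBuckets, List.map_map, Function.comp_def]
          rw [he]
          exact PySem.Set.nodup_ofList _
        have hperm : ((PySem.List.sorted (pvBuckets f) (fun p => p.1) true).map (fun p => p.1)).Perm
            ((pvBuckets f).map (fun p => p.1)) :=
          (PySem.List.sorted_perm _ _ _).map _
        have hnd : ((PySem.List.sorted (pvBuckets f) (fun p => p.1) true).map (fun p => p.1)).Nodup :=
          hperm.nodup_iff.mpr hnodupF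
        exact (List.pairwise_map).mp hnd
      refine ((h1.and h2).imp_of_mem ?_)
      intro p q hp hq h
      rcases hmemSP p hp with ⟨_, hps⟩
      rcases hmemSP q hq with ⟨_, hqs⟩
      intro a ha b hb
      rw [hps] at ha
      rw [hqs] at hb
      rcases hbmem p.1 a ha with ⟨hfa, hal⟩
      rcases hbmem q.1 b hb with ⟨hfb, hbl⟩
      have hba := idx_bounds a hal
      have hbb := idx_bounds b hbl
      have hlt : q.1 < p.1 := lt_of_le_of_ne h.1 (Ne.symm h.2)
      rw [hfa, hfb]
      omega

theorem join_singletons (cs : List Char) :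
    PySem.Str.join "" (cs.map (fun c => String.ofList [c])) = String.ofList cs := by
  have h := congrArg String.ofList (toList_join_singletons cs)
  rwa [String.ofList_toList] at h

theorem join_join (L : List (List Char)) :
    PySem.Str.join "" (L.map (fun l => PySem.Str.join "" (l.map (fun c => String.ofList [c]))))
      = String.ofList L.flatten := by
  have h : List.map String.toList (L.map (fun l => PySem.Str.join "" (l.map (fun c => String.ofList [c])))) = L := by
    rw [List.map_map]
    have : ∀ l ∈ L, (String.toList ∘ fun l => PySem.Str.join "" (l.map (fun c => String.ofList [c]))) l = l := by
      intro l _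
      exact toList_join_singletons l
    rw [List.map_congr_left this]
    simp
  have h0 : PySem.Str.join "" (L.map (fun l => PySem.Str.join "" (l.map (fun c => String.ofList [c]))))
      = String.ofList (PySem.Chars.join []
          (List.map String.toList (L.map (fun l => PySem.Str.join "" (l.map (fun c => String.ofList [c])))))) := rfl
  rw [h0, h, charsJoin_nil_eq_flatten]

-- B's sort with the tuple key equals the sort by the single composite key
theorem sorted2_eq (m : String) :
    PySem.List.sorted2 pvETAOINL (fun c => (pvCountsB m).getD c 0) pvIdx true
      = PySem.List.sorted pvETAOINL (fun c => 26 * cntMsg m c + pvIdx c) true := by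
  simp only [PySem.List.sorted2, PySem.List.sorted, if_true]
  apply foldl_insertBy_congr (fun c => c ∈ pvETAOINL)
  · intro a b ha hb
    have hka := cntB m a ha
    have hkb := cntB m b hb
    have hba := idx_bounds a (etaoin_perm_letters.mem_iff.mp ha)
    have hbb := idx_bounds b (etaoin_perm_letters.mem_iff.mp hb)
    simp only [hka, hkb]
    rw [Bool.eq_iff_iff]
    simp only [Bool.or_eq_true, Bool.and_eq_true, Bool.not_eq_true', decide_eq_true_eq,
      decide_eq_false_iff_not]
    omega
  · intro x hx; exact hx
  · intro x hx; exact absurd hx (List.not_mem_nil)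

-- A's grouping loop equals the canonical 'modify' grouping loop on the counts
theorem group_fold_eq (m : String) :
    pvLETTERSL.foldl
      (fun d c =>
        if d.contains ((pvGetLetterCount m).getD c 0) = false then
          d.insert ((pvGetLetterCount m).getD c 0) [c]
        else
          d.modify ((pvGetLetterCount m).getD c 0) [] (· ++ [c]))
      PySem.Dict.empty
    = pvLETTERSL.foldl (fun d c => d.modify (cntMsg m c) [] (· ++ [c])) PySem.Dict.empty := by
  apply PySem.List.foldl_congr_mem
  intro d c hc
  rw [cntA m c hc]
  by_cases h : d.contains (cntMsg m c) = false
  · rw [if_pos h]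
    simp [PySem.Dict.modify, PySem.Dict.getD_of_not_contains d _ h]
  · rw [if_neg h]

theorem A_eq (m : String) : get_frequency_order m
    = String.ofList (((PySem.List.sorted (pvBuckets (cntMsg m)) (fun p => p.1) true).map
        (fun p => p.2)).flatten) := by
  simp only [get_frequency_order]
  rw [group_fold_eq m]
  have hitems := groupItems (cntMsg m) pvLETTERSL
  rw [hitems]
  have hmaps :
      ((PySem.Set.ofList (pvLETTERSL.map (cntMsg m))).map
          (fun v => (v, pvLETTERSL.filter (fun c => cntMsg m c == v)))).map
        (fun p => (p.1, PySem.Str.join "" ((PySem.List.sorted p.2 pvIdx true).map (fun c => String.ofList [c]))))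
      = (pvBuckets (cntMsg m)).map
          (fun p => (p.1, PySem.Str.join "" (p.2.map (fun c => String.ofList [c])))) := by
    simp [pvBuckets, List.map_map, Function.comp_def]
  rw [hmaps]
  rw [sorted_fst_map_comm (fun p => (p.1, PySem.Str.join "" (p.2.map (fun c => String.ofList [c]))))
      (fun p => rfl) (pvBuckets (cntMsg m))]
  rw [PySem.List.foldl_append_eq_flatMap]
  simp only [List.nil_append, List.flatMap_map]
  have hbind : ∀ (SP : List (Int × List Char)),
      (SP.flatMap fun p => [(p.1, PySem.Str.join "" (p.2.map (fun c => String.ofList [c]))).2])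
        = (SP.map (fun p => p.2)).map (fun l => PySem.Str.join "" (l.map (fun c => String.ofList [c]))) := by
    intro SP
    induction SP with
    | nil => rfl
    | cons p t ih => simp [ih]
  rw [hbind]
  rw [join_join]

theorem B_eq (m : String) : get_frequency_order_alt m
    = String.ofList (PySem.List.sorted pvETAOINL (fun c => 26 * cntMsg m c + pvIdx c) true) := by
  simp only [get_frequency_order_alt]
  rw [sorted2_eq m, join_singletons]

-- ===== VERDICT (by name: the statement is the Claim_ definition above) =====
theorem get_frequency_order_spec : Claim_equal_get_frequency_order := by
  intro m _
  unfold Spec_get_frequency_order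
  rw [A_eq m, B_eq m, buckets_eq_sorted_key (cntMsg m)]
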